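-- pv_equiv track=rewrite | github.com/e2720pjk/auto-subtitle-translate | auto_subtitle_cli/cli.py | merge_short_texts
-- ===== SOURCE A (Python) =====
-- from typing import List, Tuple
--
-- def merge_short_texts(text_batch: List[str], min_length: int = 5, target_length: int = 50) -> Tuple[List[str], List[List[int]]]:
--     """Merge short texts and return mapping for reconstruction."""
--     if not text_batch:
--         return [], []
--
--     merged_texts = []
--     mapping = []  # List of lists containing original indices for each merged text
--
--     current_merged = ""
--     current_indices = []
--
--     for i, text in enumerate(text_batch):
--         text = text.strip()
--
--         # If text is very short, try to merge
--         if len(text) < min_length and len(current_merged + " " + text) <= target_length: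
--             if current_merged:
--                 current_merged += " " + text
--             else:
--                 current_merged = text
--             current_indices.append(i)
--         else:
--             # If we have accumulated short texts, add them as a merged group
--             if current_merged:
--                 merged_texts.append(current_merged)
--                 mapping.append(current_indices)
--                 current_merged = ""
--                 current_indices = []
--
--             # Add current text as individual item
--             merged_texts.append(text)
--             mapping.append([i])
--
--     # Don't forget the last accumulated group
--     if current_merged:
--         merged_texts.append(current_merged)
--         mapping.append(current_indices)
--
--     return merged_texts, mapping
-- ===== SOURCE B (Python) =====
-- from typing import List, Tuple
--
-- def merge_short_texts(text_batch: List[str], min_length: int = 5, target_length: int = 50) -> Tuple[List[str], List[List[int]]]: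
--     """Merge short texts and return mapping for reconstruction."""
--     # Pass 1: compute only the index groups, tracking the running merged length
--     # (cur_len = length of the group's joined text so far) instead of a string.
--     mapping = []
--     cur_len = 0
--     cur_indices = []
--     for i, text in enumerate(text_batch):
--         n = len(text.strip())
--         if n < min_length and cur_len + 1 + n <= target_length:
--             cur_len = cur_len + 1 + n if cur_len else n
--             cur_indices.append(i)
--         else:
--             if cur_len:
--                 mapping.append(cur_indices)
--                 cur_indices = []
--                 cur_len = 0
--             mapping.append([i])
--     if cur_len:
--         mapping.append(cur_indices)
--     # Pass 2: build each merged text once from its index group.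
--     merged_texts = [join_with_spaces(text_batch[j].strip() for j in group)
--                     for group in mapping]
--     return merged_texts, mapping
--
-- def join_with_spaces(parts):
--     s = ""
--     for t in parts:
--         s = s + " " + t if s else t
--     return s
-- ===== Notes on version B (the rewrite author's own statement) =====
-- stated objective: alternative
-- what changed: B splits the work into two passes: pass 1 computes only the index groups while tracking a running integer length instead of concatenating merged strings inside the grouping loop; pass 2 then builds each merged text once per group with a separator-inserting fold.
import Mathlib
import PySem

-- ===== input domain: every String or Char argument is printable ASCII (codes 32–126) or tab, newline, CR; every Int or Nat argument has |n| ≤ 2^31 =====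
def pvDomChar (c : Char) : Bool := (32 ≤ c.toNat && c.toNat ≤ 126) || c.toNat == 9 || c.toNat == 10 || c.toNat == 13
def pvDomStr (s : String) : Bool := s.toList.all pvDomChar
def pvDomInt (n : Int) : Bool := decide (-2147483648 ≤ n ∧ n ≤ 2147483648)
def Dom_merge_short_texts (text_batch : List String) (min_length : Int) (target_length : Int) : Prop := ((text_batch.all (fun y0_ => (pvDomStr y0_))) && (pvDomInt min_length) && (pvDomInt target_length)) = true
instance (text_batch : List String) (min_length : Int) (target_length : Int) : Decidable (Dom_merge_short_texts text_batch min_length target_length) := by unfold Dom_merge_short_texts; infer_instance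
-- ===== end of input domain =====

-- B is a two-pass decomposition: pass 1 computes only the index groups with a running
-- integer length; pass 2 builds each merged text once per group.  A = B everywhere.

-- ===== PORT A =====
def mstA_step (min_length target_length : Int)
    (st : List String × List (List Int) × String × List Int) (p : Int × String) :
    List String × List (List Int) × String × List Int :=
  match st with
  | (merged, mapping, cur, idx) =>
    let t := PySem.Str.strip p.2
    if PySem.Str.len t < min_length ∧ PySem.Str.len (cur ++ " " ++ t) ≤ target_length then
      if cur ≠ "" then (merged, mapping, cur ++ " " ++ t, idx ++ [p.1])
      else (merged, mapping, t, idx ++ [p.1])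
    else if cur ≠ "" then
      (merged ++ [cur] ++ [t], mapping ++ [idx] ++ [[p.1]], "", [])
    else
      (merged ++ [t], mapping ++ [[p.1]], cur, idx)

def merge_short_texts (text_batch : List String) (min_length : Int) (target_length : Int) :
    List String × List (List Int) :=
  if text_batch = [] then ([], [])
  else
    match (PySem.List.enumerate text_batch).foldl (mstA_step min_length target_length)
        ([], [], "", []) with
    | (merged, mapping, cur, idx) =>
      if cur ≠ "" then (merged ++ [cur], mapping ++ [idx]) else (merged, mapping)

-- ===== PORT B =====
def mstB_step (min_length target_length : Int)
    (st : List (List Int) × Int × List Int) (p : Int × String) :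
    List (List Int) × Int × List Int :=
  match st with
  | (mapping, curLen, idx) =>
    let n := PySem.Str.len (PySem.Str.strip p.2)
    if n < min_length ∧ curLen + 1 + n ≤ target_length then
      (mapping, if curLen ≠ 0 then curLen + 1 + n else n, idx ++ [p.1])
    else if curLen ≠ 0 then
      (mapping ++ [idx] ++ [[p.1]], 0, [])
    else
      (mapping ++ [[p.1]], curLen, idx)

-- join_with_spaces: fold that inserts a separator only before a non-first part
def mstJoinWithSpaces (parts : List String) : String :=
  parts.foldl (fun s t => if s ≠ "" then s ++ " " ++ t else t) ""

def mstJoinGroup (texts : List String) (g : List Int) : String :=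
  mstJoinWithSpaces (g.map (fun j => PySem.Str.strip ((PySem.List.pyGet? texts j).getD "")))

def merge_short_texts_alt (text_batch : List String) (min_length : Int) (target_length : Int) :
    List String × List (List Int) :=
  match (PySem.List.enumerate text_batch).foldl (mstB_step min_length target_length)
      ([], 0, []) with
  | (mapping, curLen, idx) =>
    let mapping := if curLen ≠ 0 then mapping ++ [idx] else mapping
    (mapping.map (mstJoinGroup text_batch), mapping)

-- ===== PRECONDITION & SPEC =====
def Spec_merge_short_texts (text_batch : List String) (min_length : Int) (target_length : Int) (out : List String × List (List Int)) : Prop := out = merge_short_texts_alt text_batch min_length target_length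
instance (text_batch : List String) (min_length : Int) (target_length : Int) (out : List String × List (List Int)) : Decidable (Spec_merge_short_texts text_batch min_length target_length out) := by unfold Spec_merge_short_texts; infer_instance

-- ===== CLAIM (what is proved, stated in full; the proofs are below) =====
def Claim_equal_merge_short_texts : Prop := ∀ (text_batch : List String) (min_length : Int) (target_length : Int), Dom_merge_short_texts text_batch min_length target_length → Spec_merge_short_texts text_batch min_length target_length (merge_short_texts text_batch min_length target_length)

-- ===== LEMMAS AND PROOFS =====

-- A's in-loop string accumulator step
def mstF (s t : String) : String := if s ≠ "" then s ++ " " ++ t else t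

-- the merged string A holds for the group of indices `ix`
def mstCur (texts : List String) (ix : List Int) : String :=
  (ix.map (fun j => PySem.Str.strip ((PySem.List.pyGet? texts j).getD ""))).foldl mstF ""

-- A's loop state, reconstructed from B's loop state
def mstLift (texts : List String) (st : List (List Int) × Int × List Int) :
    List String × List (List Int) × String × List Int :=
  (st.1.map (mstJoinGroup texts), st.1, mstCur texts st.2.2, st.2.2)

lemma mst_str_empty_iff (s : String) : s = "" ↔ s.toList = [] := by
  rw [String.ext_iff]; simp

lemma mst_len_zero_iff (s : String) : PySem.Str.len s = 0 ↔ s = "" := by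
  rw [mst_str_empty_iff]
  simp [PySem.Str.len]

lemma mst_len_append (s t : String) :
    PySem.Str.len (s ++ " " ++ t) = PySem.Str.len s + 1 + PySem.Str.len t := by
  simp [PySem.Str.len]
  ring

lemma mst_joinGroup_eq (texts : List String) (g : List Int) :
    mstJoinGroup texts g = mstCur texts g := rfl

lemma mst_cur_append (texts : List String) (ix : List Int) (j : Int) :
    mstCur texts (ix ++ [j])
      = mstF (mstCur texts ix) (PySem.Str.strip ((PySem.List.pyGet? texts j).getD "")) := by
  simp [mstCur]

lemma mst_empty_of (c : String) (cl : Int) (hlen : cl = PySem.Str.len c) (hz : cl = 0) :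
    c = "" := by
  rw [hz] at hlen
  exact (mst_len_zero_iff _).mp hlen.symm

lemma mst_nonempty_of (c : String) (cl : Int) (hlen : cl = PySem.Str.len c) (hz : cl ≠ 0) :
    c ≠ "" := fun h => hz (by rw [hlen, h]; exact (mst_len_zero_iff _).mpr rfl)

-- one loop step: A's step on the lifted state mirrors B's step, and B's running
-- length stays equal to the length of A's string accumulator
lemma mst_step_lift (texts : List String) (ml tl : Int)
    (mp : List (List Int)) (cl : Int) (ix : List Int) (p : Int × String)
    (hp : PySem.List.pyGet? texts p.1 = some p.2)
    (hlen : cl = PySem.Str.len (mstCur texts ix)) :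
    mstA_step ml tl (mstLift texts (mp, cl, ix)) p = mstLift texts (mstB_step ml tl (mp, cl, ix) p)
    ∧ (mstB_step ml tl (mp, cl, ix) p).2.1
        = PySem.Str.len (mstCur texts (mstB_step ml tl (mp, cl, ix) p).2.2) := by
  have hcur_app : mstCur texts (ix ++ [p.1])
      = mstF (mstCur texts ix) (PySem.Str.strip p.2) := by
    rw [mst_cur_append, hp]
    rfl
  have hsingle : mstCur texts [p.1] = PySem.Str.strip p.2 := by
    have := mst_cur_append texts [] p.1
    rw [hp] at this
    simpa [mstCur, mstF] using this
  by_cases hm : PySem.Str.len (PySem.Str.strip p.2) < ml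
      ∧ cl + 1 + PySem.Str.len (PySem.Str.strip p.2) ≤ tl
  · -- merge branch taken in both
    have hmA : PySem.Str.len (PySem.Str.strip p.2) < ml
        ∧ PySem.Str.len (mstCur texts ix ++ " " ++ PySem.Str.strip p.2) ≤ tl := by
      rw [mst_len_append]
      obtain ⟨h1, h2⟩ := hm
      omega
    by_cases hz : cl = 0
    · have hce : mstCur texts ix = "" := mst_empty_of _ _ hlen hz
      have hceF : ¬ (mstCur texts ix ≠ "") := not_not_intro hce
      have hzF : ¬ (cl ≠ 0) := not_not_intro hz
      constructor
      · simp only [mstA_step, mstB_step, mstLift]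
        rw [if_pos hmA, if_pos hm, if_neg hceF, if_neg hzF]
        simp [hcur_app, mstF, hce]
      · simp only [mstB_step]
        rw [if_pos hm, if_neg hzF]
        simp [hcur_app, mstF, hce]
    · have hce : mstCur texts ix ≠ "" := mst_nonempty_of _ _ hlen hz
      constructor
      · simp only [mstA_step, mstB_step, mstLift]
        rw [if_pos hmA, if_pos hm, if_pos hce, if_pos hz]
        simp [hcur_app, mstF, hce]
      · simp only [mstB_step]
        rw [if_pos hm, if_pos hz]
        simp only [hcur_app, mstF, if_pos hce, mst_len_append]
        omega
  · -- flush / singleton branch in both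
    have hmA : ¬ (PySem.Str.len (PySem.Str.strip p.2) < ml
        ∧ PySem.Str.len (mstCur texts ix ++ " " ++ PySem.Str.strip p.2) ≤ tl) := by
      rw [mst_len_append]
      intro hco
      exact hm ⟨hco.1, by omega⟩
    by_cases hz : cl = 0
    · have hce : mstCur texts ix = "" := mst_empty_of _ _ hlen hz
      have hceF : ¬ (mstCur texts ix ≠ "") := not_not_intro hce
      have hzF : ¬ (cl ≠ 0) := not_not_intro hz
      constructor
      · simp only [mstA_step, mstB_step, mstLift]
        rw [if_neg hmA, if_neg hm, if_neg hceF, if_neg hzF]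
        simp [mst_joinGroup_eq, hsingle, hce]
      · simp only [mstB_step]
        rw [if_neg hm, if_neg hzF]
        exact hlen
    · have hce : mstCur texts ix ≠ "" := mst_nonempty_of _ _ hlen hz
      constructor
      · simp only [mstA_step, mstB_step, mstLift]
        rw [if_neg hmA, if_neg hm, if_pos hce, if_pos hz]
        simp [mst_joinGroup_eq, mstCur, hp, mstF]
      · simp only [mstB_step]
        rw [if_neg hm, if_pos hz]
        simp [mstCur]

lemma mst_loop_lift (texts : List String) (ml tl : Int) :
    ∀ (l : List (Int × String)) (mp : List (List Int)) (cl : Int) (ix : List Int),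
    (∀ p ∈ l, PySem.List.pyGet? texts p.1 = some p.2) →
    cl = PySem.Str.len (mstCur texts ix) →
    l.foldl (mstA_step ml tl) (mstLift texts (mp, cl, ix))
        = mstLift texts (l.foldl (mstB_step ml tl) (mp, cl, ix))
    ∧ (l.foldl (mstB_step ml tl) (mp, cl, ix)).2.1
        = PySem.Str.len (mstCur texts (l.foldl (mstB_step ml tl) (mp, cl, ix)).2.2) := by
  intro l
  induction l with
  | nil => intro mp cl ix _ hlen; exact ⟨rfl, hlen⟩
  | cons p l ih =>
    intro mp cl ix hmem hlen
    obtain ⟨hstep, hlen'⟩ := mst_step_lift texts ml tl mp cl ix p (hmem p (by simp)) hlen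
    rcases hB : mstB_step ml tl (mp, cl, ix) p with ⟨mp', cl', ix'⟩
    rw [hB] at hstep hlen'
    simp only [List.foldl_cons, hstep, hB]
    exact ih mp' cl' ix' (fun q hq => hmem q (by simp [hq])) hlen'

lemma mst_enum_get (texts : List String) :
    ∀ p ∈ PySem.List.enumerate texts 0, PySem.List.pyGet? texts p.1 = some p.2 := by
  intro p hp
  rw [PySem.List.mem_enumerate_iff] at hp
  obtain ⟨k, hk, rfl⟩ := hp
  simp [hk]

-- ===== VERDICT (by name: the statement is the Claim_ definition above) =====
theorem merge_short_texts_spec : Claim_equal_merge_short_texts := by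
  intro texts ml tl _
  unfold Spec_merge_short_texts
  by_cases hnil : texts = []
  · subst hnil
    rfl
  · rw [merge_short_texts, if_neg hnil, merge_short_texts_alt]
    have hinit : mstLift texts ([], 0, []) = ([], [], "", []) := by
      simp [mstLift, mstCur]
    obtain ⟨hloop, hlen⟩ :=
      mst_loop_lift texts ml tl (PySem.List.enumerate texts 0) [] 0 []
        (mst_enum_get texts) (by simp [mstCur, PySem.Str.len])
    rw [← hinit, hloop]
    rcases hB : (PySem.List.enumerate texts 0).foldl (mstB_step ml tl) ([], 0, [])
      with ⟨mp, cl, ix⟩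
    rw [hB] at hlen
    simp only [mstLift]
    by_cases hz : cl = 0
    · have hce : mstCur texts ix = "" := mst_empty_of _ _ hlen hz
      have hceF : ¬ (mstCur texts ix ≠ "") := not_not_intro hce
      have hzF : ¬ (cl ≠ 0) := not_not_intro hz
      rw [if_neg hceF, if_neg hzF]
    · have hce : mstCur texts ix ≠ "" := mst_nonempty_of _ _ hlen hz
      rw [if_pos hce, if_pos hz]
      simp [mst_joinGroup_eq]
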